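-- pv_equiv track=rewrite | github.com/abdiesu04/OpenGL-Programming | D_GCD_sequence.py | valid
-- ===== SOURCE A (Python) =====
-- from math import gcd
--
-- def valid(a):
--     n = len(a)
--     g = [0] * (n-1)
--     for i in range(n-1):
--         g[i] = gcd(a[i], a[i+1])
--     for i in range(1, n-1):
--         if g[i] < g[i-1]:
--             return False
--     return True
-- ===== SOURCE B (Python) =====
-- from math import gcd
--
-- def valid(a):
--     gcds = [gcd(x, y) for x, y in zip(a, a[1:])]
--     return gcds == sorted(gcds)
-- ===== Notes on version B (the rewrite author's own statement) =====
-- stated objective: alternative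
-- what changed: B builds the adjacent-gcd list in one comprehension and decides monotonicity by comparing it with its sorted copy (gcds == sorted(gcds)), instead of A's preallocated array filled by index and rescanned with an adjacent-pair comparison loop.
import Mathlib
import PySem

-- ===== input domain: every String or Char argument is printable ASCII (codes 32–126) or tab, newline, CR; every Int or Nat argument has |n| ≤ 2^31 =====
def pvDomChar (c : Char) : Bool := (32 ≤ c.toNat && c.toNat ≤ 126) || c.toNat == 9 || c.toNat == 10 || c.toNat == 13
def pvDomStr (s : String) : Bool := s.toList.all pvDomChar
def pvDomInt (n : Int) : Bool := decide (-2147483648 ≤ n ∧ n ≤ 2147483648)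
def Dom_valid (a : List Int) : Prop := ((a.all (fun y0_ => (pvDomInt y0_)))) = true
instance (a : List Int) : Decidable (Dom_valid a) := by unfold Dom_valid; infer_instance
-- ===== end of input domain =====

-- B decides monotonicity of the adjacent-gcd list by comparing it with its sorted copy,
-- instead of A's index-filled array rescanned with an adjacent-pair loop (alternative algorithm).

-- ===== PORT A =====
-- math.gcd: nonnegative gcd of the absolute values (shared by both Pythons)
def validGcd (x y : Int) : Int := (Int.gcd x y : Int)

-- A's second loop: 'for i in range(1, n-1): if g[i] < g[i-1]: return False'
def validCheck (g : List Int) : List Int → Bool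
  | [] => true
  | i :: rest =>
      if PySem.List.pyGetD g i 0 < PySem.List.pyGetD g (i - 1) 0 then false
      else validCheck g rest

def valid (a : List Int) : Bool :=
  let n : Int := a.length
  let g0 : List Int := List.replicate (n - 1).toNat 0
  let g : List Int := (PySem.List.pyRange 0 (n - 1) 1).foldl
    (fun g i => PySem.List.pySetD g i
      (validGcd (PySem.List.pyGetD a i 0) (PySem.List.pyGetD a (i + 1) 0))) g0
  validCheck g (PySem.List.pyRange 1 (n - 1) 1)

-- ===== PORT B =====
-- '[gcd(x, y) for x, y in zip(a, a[1:])]'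
def gcdPairs : List Int → List Int
  | x :: y :: r => validGcd x y :: gcdPairs (y :: r)
  | _ => []

-- 'return gcds == sorted(gcds)'
def valid_alt (a : List Int) : Bool :=
  let gcds := gcdPairs a
  decide (gcds = PySem.List.sorted gcds (fun x => x) false)

-- ===== PRECONDITION & SPEC =====
def Spec_valid (a : List Int) (out : Bool) : Prop := out = valid_alt a
instance (a : List Int) (out : Bool) : Decidable (Spec_valid a out) := by unfold Spec_valid; infer_instance

-- ===== CLAIM (what is proved, stated in full; the proofs are below) =====
def Claim_equal_valid : Prop := ∀ (a : List Int), Dom_valid a → Spec_valid a (valid a)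

-- ===== LEMMAS AND PROOFS =====

-- non-decreasing check with early exit (proof-only characterisation of A's second loop)
def pairCheck : List Int → Bool
  | x :: y :: r => if y < x then false else pairCheck (y :: r)
  | _ => true

lemma pairCheck_iff_chain : ∀ g : List Int, pairCheck g = true ↔ List.IsChain (· ≤ ·) g := by
  intro g
  induction g with
  | nil => simp [pairCheck]
  | cons x t ih =>
    cases t with
    | nil => simp [pairCheck]
    | cons y r =>
      simp only [pairCheck, List.isChain_cons_cons]
      split_ifs with h
      · constructor
        · intro hf; exact absurd hf (by simp)
        · rintro ⟨hxy, -⟩; omega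
      · rw [ih]
        constructor
        · intro hc; exact ⟨by omega, hc⟩
        · rintro ⟨-, hc⟩; exact hc

lemma pairCheck_eq_sorted_test (g : List Int) :
    pairCheck g = decide (g = PySem.List.sorted g (fun x => x) false) := by
  by_cases h : pairCheck g = true
  · have hp : g.Pairwise (· ≤ ·) :=
      List.isChain_iff_pairwise.mp ((pairCheck_iff_chain g).mp h)
    have hs : PySem.List.sorted g (fun x => x) false = g :=
      PySem.List.sorted_eq_self_of_pairwise g (fun x => x) hp
    simp [h, hs]
  · have hb : pairCheck g = false := by
      cases hpc : pairCheck g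
      · rfl
      · exact absurd hpc h
    rw [hb]
    by_contra hc
    have heq : g = PySem.List.sorted g (fun x => x) false := by
      by_contra hne
      simp [hne] at hc
    have hp : g.Pairwise (· ≤ ·) := by
      rw [heq]
      simpa using PySem.List.sorted_pairwise (xs := g) (key := fun x => x)
    exact h ((pairCheck_iff_chain g).mpr (List.isChain_iff_pairwise.mpr hp))

-- A's first loop: filling the preallocated array equals mapping over the index range
lemma foldl_set_range (f : Int → Int) :
    ∀ (m : Nat) (g : List Int), m ≤ g.length →
    (PySem.List.pyRange 0 (m : Int) 1).foldl (fun g i => PySem.List.pySetD g i (f i)) g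
      = (List.range m).map (fun k : Nat => f k) ++ g.drop m := by
  intro m
  induction m with
  | zero => intro g _; simp [PySem.List.pyRange_one_eq_nil]
  | succ m ih =>
    intro g hm
    have hcast : ((m + 1 : Nat) : Int) = (m : Int) + 1 := by push_cast; ring
    rw [hcast, PySem.List.pyRange_one_succ_right (by positivity), List.foldl_append]
    rw [ih g (by omega)]
    simp only [List.foldl_cons, List.foldl_nil]
    rw [PySem.List.pySetD_natCast]
    have hlen : ((List.range m).map (fun k : Nat => f k)).length = m := by simp
    rw [List.set_append_right _ _ (by omega)]
    have hdrop : g.drop m = g[m] :: g.drop (m + 1) :=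
      List.drop_eq_getElem_cons (by omega)
    have hset : (g.drop m).set 0 (f m) = f m :: g.drop (m + 1) := by rw [hdrop]; rfl
    simp [List.range_succ, hlen, hset]

-- the filled array is exactly the adjacent-gcd list
lemma map_range_eq_gcdPairs :
    ∀ a : List Int, (List.range (a.length - 1)).map
      (fun k : Nat => validGcd (PySem.List.pyGetD a (k : Int) 0) (PySem.List.pyGetD a ((k : Int) + 1) 0))
      = gcdPairs a := by
  intro a
  induction a with
  | nil => simp [gcdPairs]
  | cons x t ih =>
    cases t with
    | nil => simp [gcdPairs]
    | cons y r =>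
      have hlen : (x :: y :: r).length - 1 = r.length + 1 := by simp
      rw [hlen, List.range_succ_eq_map, List.map_cons, List.map_map]
      simp only [gcdPairs]
      congr 1
      · simp [pysem]
      · rw [← ih]
        have hlen2 : (y :: r).length - 1 = r.length := by simp
        rw [hlen2]
        apply List.map_congr_left
        intro k _
        simp only [Function.comp, Nat.succ_eq_add_one]
        have e1 : PySem.List.pyGetD (x :: y :: r) ((k + 1 : Nat) : Int) 0 = (y :: r).getD k 0 := by
          rw [PySem.List.pyGetD_natCast]; rfl
        have e2 : PySem.List.pyGetD (x :: y :: r) (((k + 1 : Nat) : Int) + 1) 0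
            = PySem.List.pyGetD (y :: r) ((k : Int) + 1) 0 := by
          rw [show (((k + 1 : Nat) : Int) + 1) = ((k + 2 : Nat) : Int) by push_cast; ring,
              show ((k : Int) + 1) = ((k + 1 : Nat) : Int) by push_cast; ring,
              PySem.List.pyGetD_natCast, PySem.List.pyGetD_natCast]
          rfl
        rw [e1, e2]
        congr 1
        rw [show ((k : Nat) : Int) = ((k : Nat) : Int) by rfl, PySem.List.pyGetD_natCast]

-- A's second loop over indices k+1 .. len-1 is the pairwise check on the dropped list
lemma validCheck_eq_pairCheck (g : List Int) :
    ∀ (d k : Nat), g.length - k = d →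
    validCheck g (PySem.List.pyRange ((k : Int) + 1) (g.length : Int) 1) = pairCheck (g.drop k) := by
  intro d
  induction d with
  | zero =>
    intro k hk
    rw [PySem.List.pyRange_one_eq_nil (by omega)]
    have : g.drop k = [] := List.drop_eq_nil_of_le (by omega)
    simp [this, validCheck, pairCheck]
  | succ d ih =>
    intro k hk
    by_cases hlt : k + 1 < g.length
    · rw [PySem.List.pyRange_one_cons (by exact_mod_cast hlt)]
      simp only [validCheck]
      have hg1 : PySem.List.pyGetD g ((k : Int) + 1) 0 = g[k + 1] := by
        have : ((k : Int) + 1) = ((k + 1 : Nat) : Int) := by push_cast; ring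
        rw [this, PySem.List.pyGetD_natCast]
        exact List.getD_eq_getElem _ _ hlt
      have hg0 : PySem.List.pyGetD g ((k : Int) + 1 - 1) 0 = g[k] := by
        have : ((k : Int) + 1 - 1) = ((k : Nat) : Int) := by ring
        rw [this, PySem.List.pyGetD_natCast]
        exact List.getD_eq_getElem _ _ (by omega)
      have hdropk : g.drop k = g[k] :: g.drop (k + 1) :=
        List.drop_eq_getElem_cons (by omega)
      have hdropk1 : g.drop (k + 1) = g[k + 1] :: g.drop (k + 2) :=
        List.drop_eq_getElem_cons (by omega)
      rw [hg1, hg0, hdropk, hdropk1]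
      simp only [pairCheck]
      split_ifs with h
      · rfl
      · have hcast : ((k : Int) + 1 + 1) = ((k + 1 : Nat) : Int) + 1 := by push_cast; ring
        rw [hcast, ih (k + 1) (by omega), hdropk1]
    · rw [PySem.List.pyRange_one_eq_nil (by exact_mod_cast (by omega : (g.length : Int) ≤ (k : Int) + 1))]
      have : g.length ≤ k + 1 := by omega
      have hd : g.drop k = [] ∨ ∃ x, g.drop k = [x] := by
        have hl : (g.drop k).length ≤ 1 := by simp; omega
        cases hgd : g.drop k with
        | nil => exact Or.inl rfl
        | cons x s =>
          right
          refine ⟨x, ?_⟩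
          have : s.length = 0 := by
            have := hgd ▸ hl
            simpa using this
          simp [List.length_eq_zero_iff.mp this]
      rcases hd with h | ⟨x, h⟩ <;> simp [h, validCheck, pairCheck]

lemma valid_eq_pairCheck (a : List Int) : valid a = pairCheck (gcdPairs a) := by
  cases a with
  | nil => rfl
  | cons x t =>
    show validCheck _ _ = _
    have hlen : ((x :: t).length : Int) - 1 = ((t.length : Nat) : Int) := by simp
    rw [hlen]
    have hrep : (((t.length : Nat) : Int)).toNat = t.length := by simp
    rw [hrep]
    rw [foldl_set_range _ t.length (List.replicate t.length 0) (by simp)]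
    rw [List.drop_eq_nil_of_le (by simp), List.append_nil]
    have hmr : (List.range t.length).map
        (fun k : Nat => validGcd (PySem.List.pyGetD (x :: t) (k : Int) 0)
          (PySem.List.pyGetD (x :: t) ((k : Int) + 1) 0)) = gcdPairs (x :: t) := by
      have := map_range_eq_gcdPairs (x :: t)
      simpa using this
    rw [hmr]
    have hglen : (gcdPairs (x :: t)).length = t.length := by
      rw [← hmr]; simp
    rw [← hglen]
    simpa using validCheck_eq_pairCheck (gcdPairs (x :: t)) (gcdPairs (x :: t)).length 0 (by omega)

-- ===== VERDICT (by name: the statement is the Claim_ definition above) =====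
theorem valid_spec : Claim_equal_valid := by
  intro a _
  show valid a = valid_alt a
  rw [valid_eq_pairCheck, valid_alt, pairCheck_eq_sorted_test]
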